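-- pv_equiv track=rewrite | github.com/Kim-Tae-Yeong/Coding-Test | 프로그래머스/2/42586. 기능개발/기능개발.py | solution
-- ===== SOURCE A (Python) =====
-- def solution(progresses, speeds):
--     answer = []
--     tmp = []
--     for progress, speed in zip(progresses, speeds):
--         cnt = 0
--         while progress < 100:
--             progress += speed
--             cnt += 1
--         tmp.append(cnt)
--     length = len(tmp)
--     cnt = 1
--     idx = 0
--     for i in range(1, length):
--         check = tmp[idx]
--         if(tmp[i] > check):
--             answer.append(cnt)
--             idx = i
--             cnt = 1
--         else:
--             cnt += 1
--         if(i == length - 1):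
--             answer.append(cnt)
--     return answer
-- ===== SOURCE B (Python) =====
-- def solution(progresses, speeds):
--     days = [0 if p >= 100 else -((p - 100) // s) for p, s in zip(progresses, speeds)]
--     if not days:
--         return []
--     answer = []
--     lead = days[0]
--     cnt = 1
--     for d in days[1:]:
--         if d > lead:
--             answer.append(cnt)
--             lead = d
--             cnt = 1
--         else:
--             cnt += 1
--     answer.append(cnt)
--     return answer
-- ===== Notes on version B (the rewrite author's own statement) =====
-- stated objective: simpler
-- what changed: Replaces the per-task incremental while loop by a closed-form ceiling division for the days, and replaces the index-based grouping (idx pointer plus last-index check inside the loop) by a single value-based grouping pass over the days list with a final append.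
-- intended difference: On inputs with exactly one zipped (progress, speed) pair A returns [] because its grouping loop over range(1, 1) never runs and never appends the final count, while B returns the intended [1] (one deployment releasing the single task). — e.g. on solution([50], [5]): A returns [], B returns [1]
import Mathlib
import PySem

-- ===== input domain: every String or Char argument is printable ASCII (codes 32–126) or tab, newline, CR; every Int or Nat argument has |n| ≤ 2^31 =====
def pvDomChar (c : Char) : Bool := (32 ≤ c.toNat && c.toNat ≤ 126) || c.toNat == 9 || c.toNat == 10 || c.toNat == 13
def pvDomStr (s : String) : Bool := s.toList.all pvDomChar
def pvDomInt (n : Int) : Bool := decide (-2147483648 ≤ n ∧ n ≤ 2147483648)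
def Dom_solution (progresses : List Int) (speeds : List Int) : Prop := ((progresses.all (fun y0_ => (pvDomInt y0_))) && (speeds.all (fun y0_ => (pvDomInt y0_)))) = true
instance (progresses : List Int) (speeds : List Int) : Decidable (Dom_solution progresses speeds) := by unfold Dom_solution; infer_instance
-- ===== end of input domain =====

-- B replaces A's per-task incremental while loop by a closed-form ceiling division and
-- the index-based grouping by a value-based single grouping pass (objective: simpler).
-- On a single zipped task A returns [] (its grouping loop never runs); B returns [1] — see D_solution.

-- ===== PORT A =====
-- while progress < 100: progress += speed; cnt += 1 — fuel (100 - progress).toNat suffices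
-- whenever the Python loop terminates (Pre_: speed ≥ 1 or progress ≥ 100); fuel only makes it total.
def pvWhileA (speed : Int) : Nat → Int → Int → Int
  | 0, _, cnt => cnt
  | f + 1, progress, cnt =>
      if progress < 100 then pvWhileA speed f (progress + speed) (cnt + 1) else cnt

-- the body of A's 'for i in range(1, length)' loop; state = (answer, cnt, idx)
def pvBodyA (tmp : List Int) (length : Int) (st : List Int × Int × Int) (i : Int) :
    List Int × Int × Int :=
  let check := PySem.List.pyGetD tmp st.2.2 0
  let st2 := if PySem.List.pyGetD tmp i 0 > check
             then (st.1 ++ [st.2.1], (1 : Int), i)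
             else (st.1, st.2.1 + 1, st.2.2)
  if i = length - 1 then (st2.1 ++ [st2.2.1], st2.2.1, st2.2.2) else st2

def solution (progresses : List Int) (speeds : List Int) : List Int :=
  let tmp := (progresses.zip speeds).map (fun ps => pvWhileA ps.2 (100 - ps.1).toNat ps.1 0)
  let length := PySem.List.len tmp
  let st := (PySem.List.pyRange 1 length 1).foldl (pvBodyA tmp length) ([], 1, 0)
  st.1

-- ===== PORT B =====
-- the body of B's 'for d in days[1:]' loop; state = (answer, lead, cnt)
def pvBodyB (st : List Int × Int × Int) (d : Int) : List Int × Int × Int :=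
  if d > st.2.1 then (st.1 ++ [st.2.2], d, 1) else (st.1, st.2.1, st.2.2 + 1)

def solution_alt (progresses : List Int) (speeds : List Int) : List Int :=
  let days := (progresses.zip speeds).map
    (fun ps => if ps.1 ≥ 100 then 0 else -(PySem.Int.floordiv (ps.1 - 100) ps.2))
  match days with
  | [] => []
  | d0 :: rest =>
      let st := rest.foldl pvBodyB ([], d0, 1)
      st.1 ++ [st.2.2]

-- ===== PRECONDITION & SPEC =====
-- Pre_ excludes pairs with progress < 100 and speed ≤ 0, on which A's while loop never terminates.
def Pre_solution (progresses : List Int) (speeds : List Int) : Prop :=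
  ∀ ps ∈ progresses.zip speeds, 100 ≤ ps.1 ∨ 1 ≤ ps.2
instance (progresses : List Int) (speeds : List Int) : Decidable (Pre_solution progresses speeds) := by
  unfold Pre_solution; infer_instance
def pvWitness_solution : List Int × List Int := ([93, 30, 55], [1, 30, 5])

-- On inputs with exactly one zipped (progress, speed) pair A returns [] because its grouping loop
-- over range(1, 1) never runs and never appends the final count, while B returns the intended [1].
def D_solution (progresses : List Int) (speeds : List Int) : Prop :=
  min progresses.length speeds.length = 1
instance (progresses : List Int) (speeds : List Int) : Decidable (D_solution progresses speeds) := by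
  unfold D_solution; infer_instance

def Spec_solution (progresses : List Int) (speeds : List Int) (out : List Int) : Prop :=
  ¬ D_solution progresses speeds → out = solution_alt progresses speeds
instance (progresses : List Int) (speeds : List Int) (out : List Int) : Decidable (Spec_solution progresses speeds out) := by
  unfold Spec_solution; infer_instance

def pvDiffWitness_solution : List Int × List Int := ([50], [5])
def pvDiffWitnessOut_solution : (List Int) × (List Int) := ([], [1])

-- ===== CLAIM (what is proved, stated in full; the proofs are below) =====
def Claim_unchanged_solution : Prop := ∀ (progresses : List Int) (speeds : List Int), Dom_solution progresses speeds → Pre_solution progresses speeds → Spec_solution progresses speeds (solution progresses speeds)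
def Claim_changed_solution : Prop := Dom_solution (pvDiffWitness_solution.1) (pvDiffWitness_solution.2) ∧ Pre_solution (pvDiffWitness_solution.1) (pvDiffWitness_solution.2) ∧ D_solution (pvDiffWitness_solution.1) (pvDiffWitness_solution.2) ∧ solution (pvDiffWitness_solution.1) (pvDiffWitness_solution.2) = pvDiffWitnessOut_solution.1 ∧ solution_alt (pvDiffWitness_solution.1) (pvDiffWitness_solution.2) = pvDiffWitnessOut_solution.2 ∧ pvDiffWitnessOut_solution.1 ≠ pvDiffWitnessOut_solution.2
def Claim_exact_solution : Prop := ∀ (progresses : List Int) (speeds : List Int), Dom_solution progresses speeds → Pre_solution progresses speeds → D_solution progresses speeds → solution progresses speeds ≠ solution_alt progresses speeds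

-- ===== LEMMAS AND PROOFS =====

-- the common grouping recursion both programs compute
def pvGrp : Int → Int → List Int → List Int
  | cnt, _, [] => [cnt]
  | cnt, lead, d :: rest => if d > lead then cnt :: pvGrp 1 d rest else pvGrp (cnt + 1) lead rest

-- A's while loop = ceiling division (when it terminates)
lemma pvWhileA_eq (s : Int) (hs : 1 ≤ s) :
    ∀ (f : Nat) (p cnt : Int), (100 - p).toNat ≤ f →
      pvWhileA s f p cnt = cnt + (if p ≥ 100 then 0 else -(PySem.Int.floordiv (p - 100) s)) := by
  intro f
  induction f with
  | zero =>
      intro p cnt hf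
      have : 100 ≤ p := by omega
      simp [pvWhileA, this]
  | succ f ih =>
      intro p cnt hf
      by_cases hp : p < 100
      · have hrec := ih (p + s) (cnt + 1) (by omega)
        rw [pvWhileA, if_pos hp, hrec]
        have hnp : ¬ (p ≥ 100) := by omega
        rw [if_neg hnp]
        by_cases hps : p + s ≥ 100
        · have h1 : PySem.Int.floordiv (p - 100) s = -1 := by
            rw [PySem.Int.floordiv_eq_iff_of_pos (by omega)]
            constructor <;> nlinarith
          rw [if_pos hps, h1]; ring
        · rw [if_neg hps]
          have hq := (PySem.Int.floordiv_eq_iff_of_pos (a := p + s - 100)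
            (b := s) (q := PySem.Int.floordiv (p + s - 100) s) (by omega)).mp rfl
          have h1 : PySem.Int.floordiv (p - 100) s = PySem.Int.floordiv (p + s - 100) s - 1 := by
            rw [PySem.Int.floordiv_eq_iff_of_pos (by omega)]
            constructor <;> nlinarith [hq.1, hq.2]
          rw [h1]; ring
      · rw [pvWhileA, if_neg hp, if_pos (by omega)]; ring

-- tmp (A) = days (B), elementwise under Pre_
lemma pvDays_eq (zs : List (Int × Int)) (hpre : ∀ ps ∈ zs, 100 ≤ ps.1 ∨ 1 ≤ ps.2) :
    zs.map (fun ps => pvWhileA ps.2 (100 - ps.1).toNat ps.1 0)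
      = zs.map (fun ps => if ps.1 ≥ 100 then 0 else -(PySem.Int.floordiv (ps.1 - 100) ps.2)) := by
  apply List.map_congr_left
  intro ps hps
  rcases hpre ps hps with h | h
  · have hz : (100 - ps.1).toNat = 0 := by omega
    simp [hz, pvWhileA, h]
  · rw [pvWhileA_eq ps.2 h _ ps.1 0 le_rfl]; ring_nf

-- B's fold computes pvGrp
lemma pvFoldB (rest : List Int) : ∀ (ans : List Int) (lead cnt : Int),
    (rest.foldl pvBodyB (ans, lead, cnt)).1 ++ [(rest.foldl pvBodyB (ans, lead, cnt)).2.2]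
      = ans ++ pvGrp cnt lead rest := by
  induction rest with
  | nil => intro ans lead cnt; simp [pvGrp]
  | cons d rest ih =>
      intro ans lead cnt
      rw [List.foldl_cons]
      by_cases h : d > lead
      · rw [show pvBodyB (ans, lead, cnt) d = (ans ++ [cnt], d, 1) by simp [pvBodyB, h]]
        rw [ih, pvGrp, if_pos h, List.append_assoc]; rfl
      · rw [show pvBodyB (ans, lead, cnt) d = (ans, lead, cnt + 1) by simp [pvBodyB, h]]
        rw [ih, pvGrp, if_neg h]

-- A's indexed fold computes pvGrp on the suffix still to be scanned
lemma pvFoldA (tmp : List Int) : ∀ (suf : List Int) (k : Nat), tmp.drop k = suf → k < tmp.length →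
    ∀ (idx lead : Int), PySem.List.pyGetD tmp idx 0 = lead →
    ∀ (ans : List Int) (cnt : Int),
      ((PySem.List.pyRange (k : Int) (PySem.List.len tmp) 1).foldl
        (pvBodyA tmp (PySem.List.len tmp)) (ans, cnt, idx)).1 = ans ++ pvGrp cnt lead suf := by
  intro suf
  induction suf with
  | nil =>
      intro k hdrop hk
      exfalso
      have := List.length_drop (l := tmp) (i := k)
      rw [hdrop] at this; simp at this; omega
  | cons d rest ih =>
      intro k hdrop hk idx lead hidx ans cnt
      have hlen : PySem.List.len tmp = (tmp.length : Int) := PySem.List.len_eq tmp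
      have hklt : (k : Int) < PySem.List.len tmp := by rw [hlen]; exact_mod_cast hk
      rw [PySem.List.pyRange_one_cons hklt, List.foldl_cons]
      have hgetk : PySem.List.pyGetD tmp (k : Int) 0 = d := by
        rw [PySem.List.pyGetD_natCast]
        have h0 : tmp[k]? = some d := by
          rw [← List.head?_drop, hdrop]; rfl
        simp [List.getD, h0]
      have hrlen : rest.length = tmp.length - (k + 1) := by
        have := List.length_drop (l := tmp) (i := k)
        rw [hdrop] at this; simp at this; omega
      by_cases hlast : (k : Int) = PySem.List.len tmp - 1
      -- k is the last index: rest = [] and the final append fires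
      · have hrest : rest = [] := by
          have : tmp.length = k + 1 := by rw [hlen] at hlast; omega
          simpa [this] using List.length_eq_zero_iff.mp (by omega)
        subst hrest
        have hrange : PySem.List.pyRange ((k : Int) + 1) (PySem.List.len tmp) 1 = [] := by
          apply PySem.List.pyRange_one_eq_nil; omega
        rw [hrange, List.foldl_nil]
        by_cases h : d > lead
        · simp only [pvBodyA, hgetk, hidx, if_pos h, if_pos hlast]
          simp [pvGrp, if_pos h, pvGrp]
        · simp only [pvBodyA, hgetk, hidx, if_neg h, if_pos hlast]
          simp [pvGrp, if_neg h, pvGrp]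
      -- not the last index: recurse
      · have hk1 : k + 1 < tmp.length := by rw [hlen] at hlast hklt; omega
        by_cases h : d > lead
        · have hbody : pvBodyA tmp (PySem.List.len tmp) (ans, cnt, idx) (k : Int)
              = (ans ++ [cnt], 1, (k : Int)) := by
            simp only [pvBodyA, hgetk, hidx, if_pos h, if_neg hlast]
          rw [hbody]
          have hdrop1 : tmp.drop (k + 1) = rest := by
            have h' := congrArg (List.drop 1) hdrop
            simp [List.drop_drop] at h'
            simpa [Nat.add_comm] using h'
          have := ih (k + 1) hdrop1 hk1 (k : Int) d hgetk (ans ++ [cnt]) 1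
          rw [show ((k : Int) + 1) = ((k + 1 : Nat) : Int) by push_cast; ring, this]
          rw [pvGrp, if_pos h, List.append_assoc]; rfl
        · have hbody : pvBodyA tmp (PySem.List.len tmp) (ans, cnt, idx) (k : Int)
              = (ans, cnt + 1, idx) := by
            simp only [pvBodyA, hgetk, hidx, if_neg h, if_neg hlast]
          rw [hbody]
          have hdrop1 : tmp.drop (k + 1) = rest := by
            have h' := congrArg (List.drop 1) hdrop
            simp [List.drop_drop] at h'
            simpa [Nat.add_comm] using h'
          have := ih (k + 1) hdrop1 hk1 idx lead hidx ans (cnt + 1)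
          rw [show ((k : Int) + 1) = ((k + 1 : Nat) : Int) by push_cast; ring, this]
          rw [pvGrp, if_neg h]

-- ===== VERDICT (by name: the statement is the Claim_ definition above) =====
theorem solution_spec : Claim_unchanged_solution := by
  intro progresses speeds _hdom hpre hD
  unfold D_solution at hD
  unfold solution solution_alt
  rw [pvDays_eq (progresses.zip speeds) hpre]
  generalize hdays : (progresses.zip speeds).map
      (fun ps => if ps.1 ≥ 100 then 0 else -(PySem.Int.floordiv (ps.1 - 100) ps.2)) = days
  have hlenz : days.length = (progresses.zip speeds).length := by
    rw [← hdays]; simp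
  cases days with
  | nil => rfl
  | cons d0 rest =>
      cases rest with
      | nil => exact absurd (by simp [List.length_zip] at hlenz ⊢; omega) hD
      | cons d1 rest' =>
          have hget0 : PySem.List.pyGetD (d0 :: d1 :: rest') (0 : Int) 0 = d0 := by
            simp [PySem.List.pyGetD_zero_cons]
          have hA := pvFoldA (d0 :: d1 :: rest') (d1 :: rest') 1 rfl (by simp) 0 d0 hget0 [] 1
          rw [show ((1 : Nat) : Int) = (1 : Int) by norm_num] at hA
          simp only [hA, pvFoldB]

theorem solution_changed : Claim_changed_solution := by
  unfold Claim_changed_solution; decide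

theorem solution_tight : Claim_exact_solution := by
  intro progresses speeds _hdom hpre hD
  unfold D_solution at hD
  have hzl : (progresses.zip speeds).length = 1 := by simp [List.length_zip, hD]
  obtain ⟨ps, hzs⟩ : ∃ ps, progresses.zip speeds = [ps] := by
    match h : progresses.zip speeds with
    | [ps] => exact ⟨ps, rfl⟩
    | [] => rw [h] at hzl; simp at hzl
    | a :: b :: t => rw [h] at hzl; simp at hzl
  unfold solution solution_alt
  rw [hzs]
  intro hcontra
  simp only [List.map_cons, List.map_nil] at hcontra
  rw [show PySem.List.len [pvWhileA ps.2 (100 - ps.1).toNat ps.1 0] = 1 from by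
        rw [PySem.List.len_eq]; rfl] at hcontra
  rw [PySem.List.pyRange_one_eq_nil (by norm_num)] at hcontra
  simp [List.foldl_nil] at hcontra
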